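-- pv_equiv track=rewrite | github.com/megyoung430/magnitude-bandit-analysis | src/behavior_import/extract_trials.py | concat_serial_numeric
-- ===== SOURCE A (Python) =====
-- def concat_serial_numeric(segments):
--     """1..N serial renumbering across segments (23 then 1 -> 24...)."""
--     out = []
--     offset = 0
--     for seg in segments:
--         if not seg:
--             continue
--         seg_vals = [x for x in seg if x is not None]
--         if not seg_vals:
--             continue
--         out.extend([x + offset for x in seg_vals])
--         offset = out[-1]  # keep continuity
--     return out
-- ===== SOURCE B (Python) =====
-- def concat_serial_numeric(segments):
--     """1..N serial renumbering across segments (23 then 1 -> 24...)."""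
--     kept = [vals for seg in segments if (vals := [x for x in seg if x is not None])]
--     lasts = [vals[-1] for vals in kept]
--     return [x + sum(lasts[:i]) for i, vals in enumerate(kept) for x in vals]
-- ===== Notes on version B (the rewrite author's own statement) =====
-- stated objective: simpler
-- what changed: Replaced A's single fold that threads a running offset and reads out[-1] with two passes: a comprehension collecting the kept (non-empty, non-None) value-lists, then a flattening comprehension that offsets each segment by the sum of the preceding kept segments' last values.
import Mathlib
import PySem

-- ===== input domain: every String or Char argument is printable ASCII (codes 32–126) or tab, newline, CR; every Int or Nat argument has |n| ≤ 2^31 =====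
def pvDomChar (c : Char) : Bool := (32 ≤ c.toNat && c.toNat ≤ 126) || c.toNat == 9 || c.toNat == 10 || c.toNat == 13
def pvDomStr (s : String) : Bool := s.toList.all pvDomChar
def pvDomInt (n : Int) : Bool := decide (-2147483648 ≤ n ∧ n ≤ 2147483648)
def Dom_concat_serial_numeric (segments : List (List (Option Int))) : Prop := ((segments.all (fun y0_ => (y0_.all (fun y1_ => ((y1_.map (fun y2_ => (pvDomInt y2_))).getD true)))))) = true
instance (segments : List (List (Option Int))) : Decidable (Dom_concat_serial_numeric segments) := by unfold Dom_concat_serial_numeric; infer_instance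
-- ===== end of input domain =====

-- B replaces A's single fold with a running offset by two passes: collect the kept value-lists,
-- then add to each segment's values an offset computed as the sum of the previous kept segments'
-- last values (objective: simpler decomposition; no speed claim).

-- ===== PORT A =====
-- A's loop body (the for-loop over segments with state (out, offset))
def pvStepA (st : List Int × Int) (seg : List (Option Int)) : List Int × Int :=
  if seg = [] then st
  else
    let seg_vals := seg.filterMap id
    if seg_vals = [] then st
    else
      let o := st.1 ++ seg_vals.map (fun x => x + st.2)
      (o, PySem.List.pyGetD o (-1) 0)   -- out[-1]; o is nonempty here, so the default is dead

def concat_serial_numeric (segments : List (List (Option Int))) : List Int :=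
  (segments.foldl pvStepA ([], 0)).1

-- ===== PORT B =====
def concat_serial_numeric_alt (segments : List (List (Option Int))) : List Int :=
  let kept := segments.filterMap (fun seg =>
    let vals := seg.filterMap id
    if vals = [] then none else some vals)
  let lasts := kept.map (fun vals => PySem.List.pyGetD vals (-1) 0)  -- vals[-1]; vals nonempty, default dead
  ((PySem.List.enumerate kept 0).map (fun p =>
    p.2.map (fun x => x + (PySem.List.slice lasts none (some p.1)).sum))).flatten

-- ===== PRECONDITION & SPEC =====
def Spec_concat_serial_numeric (segments : List (List (Option Int))) (out : List Int) : Prop := out = concat_serial_numeric_alt segments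
instance (segments : List (List (Option Int))) (out : List Int) : Decidable (Spec_concat_serial_numeric segments out) := by unfold Spec_concat_serial_numeric; infer_instance

-- ===== CLAIM (what is proved, stated in full; the proofs are below) =====
def Claim_equal_concat_serial_numeric : Prop := ∀ (segments : List (List (Option Int))), Dom_concat_serial_numeric segments → Spec_concat_serial_numeric segments (concat_serial_numeric segments)

-- ===== LEMMAS AND PROOFS =====

-- the common renumbering function on the kept (filtered, nonempty) value-lists
def pvGoK : List (List Int) → Int → List Int
  | [], _ => []
  | v :: vs, off => v.map (fun x => x + off) ++ pvGoK vs (off + v.getLastD 0)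

def pvKeepSeg (seg : List (Option Int)) : Option (List Int) :=
  if seg.filterMap id = [] then none else some (seg.filterMap id)

def pvKept (segments : List (List (Option Int))) : List (List Int) :=
  segments.filterMap pvKeepSeg

lemma pyGetD_neg_one_eq_getLastD (l : List Int) : PySem.List.pyGetD l (-1) 0 = l.getLastD 0 := by
  simp [PySem.List.pyGetD, PySem.List.pyGet?_neg_one, List.getLastD_eq_getLast?]

lemma pvStepA_of_empty (st : List Int × Int) (seg : List (Option Int))
    (h : seg.filterMap id = []) : pvStepA st seg = st := by
  unfold pvStepA
  by_cases hs : seg = []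
  · rw [if_pos hs]
  · rw [if_neg hs]
    simp only [h, reduceIte]

lemma pvStepA_of_nonempty (st : List Int × Int) (seg : List (Option Int))
    (h : seg.filterMap id ≠ []) :
    pvStepA st seg = (st.1 ++ (seg.filterMap id).map (fun x => x + st.2),
      PySem.List.pyGetD (st.1 ++ (seg.filterMap id).map (fun x => x + st.2)) (-1) 0) := by
  have hs : seg ≠ [] := by rintro rfl; exact h rfl
  unfold pvStepA
  rw [if_neg hs, if_neg h]

lemma A_loop (segs : List (List (Option Int))) (out : List Int) (off : Int) :
    (segs.foldl pvStepA (out, off)).1 = out ++ pvGoK (pvKept segs) off := by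
  induction segs generalizing out off with
  | nil => simp [pvKept, pvGoK]
  | cons seg rest ih =>
    rw [List.foldl_cons]
    by_cases h : seg.filterMap id = []
    · have hk : pvKept (seg :: rest) = pvKept rest := by
        unfold pvKept
        rw [List.filterMap_cons_none (by unfold pvKeepSeg; rw [if_pos h])]
      rw [pvStepA_of_empty _ _ h, ih, hk]
    · have hk : pvKept (seg :: rest) = seg.filterMap id :: pvKept rest := by
        unfold pvKept
        rw [List.filterMap_cons_some (by unfold pvKeepSeg; rw [if_neg h])]
      obtain ⟨a, ha⟩ := Option.isSome_iff_exists.mp (List.getLast?_isSome.mpr h)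
      have hlast : PySem.List.pyGetD (out ++ (seg.filterMap id).map (fun x => x + off)) (-1) 0
          = off + (seg.filterMap id).getLastD 0 := by
        rw [pyGetD_neg_one_eq_getLastD, List.getLastD_eq_getLast?,
          List.getLast?_append, List.getLast?_map, ha,
          List.getLastD_eq_getLast?, ha]
        simp [add_comm]
      rw [pvStepA_of_nonempty _ _ h, hk]
      simp only [pvGoK]
      rw [← List.append_assoc, ← ih, hlast]

lemma B_loop (ks pre : List (List Int)) :
    ((PySem.List.enumerate ks (pre.length : Int)).map (fun p =>
      p.2.map (fun x => x +
        (PySem.List.slice ((pre ++ ks).map (fun v => v.getLastD 0)) none (some p.1)).sum))).flatten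
    = pvGoK ks ((pre.map (fun v => v.getLastD 0)).sum) := by
  induction ks generalizing pre with
  | nil => simp [PySem.List.enumerate, pvGoK]
  | cons v vs ih =>
    rw [PySem.List.enumerate_cons]
    simp only [List.map_cons, List.flatten_cons, pvGoK]
    have h1 : PySem.List.slice ((pre ++ v :: vs).map (fun v => v.getLastD 0)) none (some (pre.length : Int))
        = pre.map (fun v => v.getLastD 0) := by
      rw [PySem.List.slice_to_natCast, List.map_append]
      exact List.take_left' (by simp)
    have e0 : pre ++ v :: vs = (pre ++ [v]) ++ vs := by simp
    have e1 : ((pre ++ [v]).length : Int) = (pre.length : Int) + 1 := by simp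
    have h2 := ih (pre ++ [v])
    rw [e1] at h2
    rw [h1, e0, h2]
    simp

-- ===== VERDICT (by name: the statement is the Claim_ definition above) =====
theorem concat_serial_numeric_spec : Claim_equal_concat_serial_numeric := by
  intro segments _
  unfold Spec_concat_serial_numeric concat_serial_numeric concat_serial_numeric_alt
  rw [A_loop]
  simp only [pyGetD_neg_one_eq_getLastD]
  have hb := B_loop (pvKept segments) []
  simp only [List.length_nil, Nat.cast_zero, List.nil_append, List.map_nil, List.sum_nil] at hb
  rw [List.nil_append, ← hb]
  rfl
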